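-- pv_equiv track=rewrite | github.com/deepspraj/CodeVita-Exam | reverseGear/reverseGear.py | timeCal
-- ===== SOURCE A (Python) =====
-- def timeCal(lst):
--     ans = 0
--     while True:
--         if(lst[1]<lst[3]):
--             instantTime = ((lst[0]+lst[1])*lst[2])
--             ans = ans + instantTime
--             lst[3]=lst[3]-(lst[1]-lst[0])
--         else:
--             instantTime = (lst[3]*lst[2])
--             ans = ans + instantTime
--             break
--     return (ans)
-- ===== SOURCE B (Python) =====
-- def timeCal(lst):
--     # Closed form: the loop runs ceil((T - b) / (b - a)) times; compute the sum directly.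
--     # (Return value only; A also mutates its argument in place, B does not.)
--     a, b, c, T = lst[0], lst[1], lst[2], lst[3]
--     if T <= b:
--         return T * c
--     d = b - a
--     n = (T - b + d - 1) // d
--     return n * (a + b) * c + (T - n * d) * c
-- ===== Notes on version B (the rewrite author's own statement) =====
-- stated objective: alternative
-- what changed: Replaced the iterative decrement loop by a closed-form computation: the number of loop iterations is obtained by ceiling division of the remaining distance by the step, and the accumulated sum is computed directly; B reads the return value only and does not mutate the fourth list element in place as A does.
import Mathlib
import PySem

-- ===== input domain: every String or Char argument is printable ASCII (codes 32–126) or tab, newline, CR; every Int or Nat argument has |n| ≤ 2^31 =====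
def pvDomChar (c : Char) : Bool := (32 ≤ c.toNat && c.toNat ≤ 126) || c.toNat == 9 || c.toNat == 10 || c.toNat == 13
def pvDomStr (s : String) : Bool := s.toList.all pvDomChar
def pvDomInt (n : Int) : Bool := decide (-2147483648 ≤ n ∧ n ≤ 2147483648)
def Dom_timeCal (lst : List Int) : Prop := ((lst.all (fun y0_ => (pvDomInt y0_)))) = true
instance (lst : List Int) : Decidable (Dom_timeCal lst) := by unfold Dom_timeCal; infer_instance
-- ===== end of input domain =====

-- B replaces A's decrement loop by a closed-form iteration count (ceiling division);
-- equivalence is about the return value only: A mutates the fourth list element in place, B does not.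


-- ===== PORT A =====
-- A's `while True` loop: only the fourth element changes across iterations, so it is carried as T.
-- The `a < b` test is only a totality guard (Pre_ guarantees it whenever the loop recurses);
-- Python diverges when b < T and ¬ a < b, which Pre_ excludes.
def timeCalLoop (a b c : Int) (T ans : Int) : Int :=
  if _h : b < T then
    if _hd : a < b then
      timeCalLoop a b c (T - (b - a)) (ans + (a + b) * c)
    else 0
  else ans + T * c
termination_by (T - b).toNat
decreasing_by omega

def timeCal (lst : List Int) : Int :=
  -- the first three elements never change across iterations; only the fourth is reassigned, carried as T.
  -- getD's default is never read inside Pre_ (length ≥ 4); shorter lists raise IndexError in Python.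
  timeCalLoop (lst.getD 0 0) (lst.getD 1 0) (lst.getD 2 0) (lst.getD 3 0) 0

-- ===== PORT B =====
def timeCal_alt (lst : List Int) : Int :=
  -- getD's default is never read inside Pre_ (length ≥ 4); shorter lists raise IndexError in Python.
  let a := lst.getD 0 0
  let b := lst.getD 1 0
  let c := lst.getD 2 0
  let T := lst.getD 3 0
  if T ≤ b then T * c
  else
    let d := b - a
    let n := PySem.Int.floordiv (T - b + d - 1) d
    n * (a + b) * c + (T - n * d) * c

-- ===== PRECONDITION & SPEC =====
-- Pre_ excludes lists shorter than 4 (Python IndexError) and the non-terminating case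
-- (second element below the fourth with step second-minus-first ≤ 0, where A loops forever).
def Pre_timeCal (lst : List Int) : Prop :=
  4 ≤ lst.length ∧ (lst.getD 3 0 ≤ lst.getD 1 0 ∨ lst.getD 0 0 < lst.getD 1 0)
instance (lst : List Int) : Decidable (Pre_timeCal lst) := by unfold Pre_timeCal; infer_instance
def pvWitness_timeCal : List Int := [1, 2, 3, 10]

def Spec_timeCal (lst : List Int) (out : Int) : Prop := out = timeCal_alt lst
instance (lst : List Int) (out : Int) : Decidable (Spec_timeCal lst out) := by unfold Spec_timeCal; infer_instance

-- ===== CLAIM (what is proved, stated in full; the proofs are below) =====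
def Claim_equal_timeCal : Prop :=
  ∀ (lst : List Int), Dom_timeCal lst → Pre_timeCal lst → Spec_timeCal lst (timeCal lst)

-- ===== LEMMAS AND PROOFS =====

-- Loop invariant: with a positive step e = b - a, the loop computes the closed form.
theorem timeCalLoop_closed (a b c : Int) (hab : a < b) (T ans : Int) :
    timeCalLoop a b c T ans =
      if T ≤ b then ans + T * c
      else ans + (PySem.Int.floordiv (T - b + (b - a) - 1) (b - a)) * (a + b) * c
             + (T - (PySem.Int.floordiv (T - b + (b - a) - 1) (b - a)) * (b - a)) * c := by
  have he : (0:Int) < b - a := by omega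
  generalize hn : (T - b).toNat = n
  induction n using Nat.strong_induction_on generalizing T ans with
  | _ n ih =>
    rw [timeCalLoop]
    by_cases h : b < T
    · rw [dif_pos h, dif_pos hab,
        ih ((T - (b - a) - b).toNat) (by omega) _ _ rfl]
      by_cases h2 : T - (b - a) ≤ b
      · rw [if_pos h2, if_neg (by omega)]
        have hn1 : PySem.Int.floordiv (T - b + (b - a) - 1) (b - a) = 1 :=
          (PySem.Int.floordiv_eq_iff_of_pos he).mpr (by constructor <;> nlinarith)
        rw [hn1]; ring
      · rw [if_neg h2, if_neg (by omega)]
        set q := PySem.Int.floordiv (T - (b - a) - b + (b - a) - 1) (b - a) with hq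
        have hqb := (PySem.Int.floordiv_eq_iff_of_pos (a := T - (b - a) - b + (b - a) - 1) he).mp hq.symm
        have hstep : PySem.Int.floordiv (T - b + (b - a) - 1) (b - a) = q + 1 :=
          (PySem.Int.floordiv_eq_iff_of_pos he).mpr (by constructor <;> nlinarith)
        rw [hstep]; ring
    · rw [dif_neg h, if_pos (by omega)]

theorem timeCal_spec : Claim_equal_timeCal := by
  intro lst _ hpre
  obtain ⟨hlen, hcase⟩ := hpre
  unfold Spec_timeCal timeCal timeCal_alt
  set a := lst.getD 0 0
  set b := lst.getD 1 0
  set c := lst.getD 2 0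
  set T := lst.getD 3 0
  by_cases hTb : T ≤ b
  · rw [timeCalLoop, dif_neg (by omega), if_pos hTb]; ring
  · have hab : a < b := by omega
    rw [timeCalLoop_closed a b c hab T 0, if_neg hTb, if_neg hTb]
    ring
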